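-- pv_equiv track=rewrite | github.com/uwidev/sd_extension-prompt_formatter | scripts/format_ui.py | depth_to_map
-- ===== SOURCE A (Python) =====
-- def depth_to_map(s: str):
--     ret = ""
--     depth = 0
--     for c in s:
--         if c in "([":
--             depth += 1
--         if c in ")]":
--             depth -= 1
--         ret += str(depth)
--     return ret
-- ===== SOURCE B (Python) =====
-- def depth_to_map(s: str):
--     # stateless: depth at position i is a closed-form prefix count over s[:i+1]
--     return "".join(
--         str(s.count("(", 0, i + 1) + s.count("[", 0, i + 1)
--             - s.count(")", 0, i + 1) - s.count("]", 0, i + 1))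
--         for i in range(len(s))
--     )
-- ===== Notes on version B (the rewrite author's own statement) =====
-- stated objective: alternative
-- what changed: Drops the running depth accumulator entirely: each position's depth is computed independently as a closed-form prefix count (opens minus closes in s[:i+1]) via str.count with slice bounds, trading A's single stateful scan for stateless per-index counting (quadratic).
import Mathlib
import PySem

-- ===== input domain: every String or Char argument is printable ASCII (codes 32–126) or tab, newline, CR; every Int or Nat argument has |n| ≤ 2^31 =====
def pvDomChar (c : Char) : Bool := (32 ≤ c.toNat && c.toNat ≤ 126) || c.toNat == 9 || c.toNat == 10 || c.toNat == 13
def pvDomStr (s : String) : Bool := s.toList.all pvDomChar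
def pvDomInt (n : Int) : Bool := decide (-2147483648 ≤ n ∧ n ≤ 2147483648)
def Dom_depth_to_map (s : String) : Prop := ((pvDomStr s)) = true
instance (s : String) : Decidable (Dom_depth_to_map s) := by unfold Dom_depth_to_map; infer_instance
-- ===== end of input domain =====

-- B replaces A's single stateful scan by stateless per-index prefix counting (alternative
-- algorithm, slower asymptotically; return value only).

-- ===== PORT A =====
-- A's loop: mutable ret (accumulated chars) and depth, one step per character.
def depthGoA : List Char → Int → List Char → List Char
  | [], _, ret => ret
  | c :: cs, depth, ret =>
    let depth := if c = '(' ∨ c = '[' then depth + 1 else depth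
    let depth := if c = ')' ∨ c = ']' then depth - 1 else depth
    depthGoA cs depth (ret ++ (PySem.Int.toStr depth).toList)

def depth_to_map (s : String) : String := String.ofList (depthGoA s.toList 0 [])

-- ===== PORT B =====
-- s.count(ch, 0, i+1) for a single char ch is exactly counting ch in the first i+1 chars
-- (ported by hand as List.count on take (i+1); exact on this slice form).
def pvPrefixDepth (l : List Char) (i : Nat) : Int :=
  let p := l.take (i + 1)
  (p.count '(' : Int) + (p.count '[' : Int) - (p.count ')' : Int) - (p.count ']' : Int)

def depth_to_map_alt (s : String) : String :=
  String.ofList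
    (((List.range s.toList.length).map
        (fun i => (PySem.Int.toStr (pvPrefixDepth s.toList i)).toList)).flatten)

-- ===== PRECONDITION & SPEC =====
def Spec_depth_to_map (s : String) (out : String) : Prop := out = depth_to_map_alt s
instance (s : String) (out : String) : Decidable (Spec_depth_to_map s out) := by unfold Spec_depth_to_map; infer_instance

-- ===== CLAIM (what is proved, stated in full; the proofs are below) =====
def Claim_equal_depth_to_map : Prop := ∀ (s : String), Dom_depth_to_map s → Spec_depth_to_map s (depth_to_map s)

-- ===== LEMMAS AND PROOFS =====

def pvDelta (c : Char) : Int :=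
  if c = '(' ∨ c = '[' then 1 else if c = ')' ∨ c = ']' then -1 else 0

-- A's two sequential ifs compute exactly depth + delta(c) (the two bracket classes are disjoint).
theorem upd_eq_delta (c : Char) (d : Int) :
    (if c = ')' ∨ c = ']' then (if c = '(' ∨ c = '[' then d + 1 else d) - 1
     else (if c = '(' ∨ c = '[' then d + 1 else d)) = d + pvDelta c := by
  unfold pvDelta
  split_ifs with h1 h2 <;> first | omega | (rcases h1 with h1 | h1 <;> rcases h2 with h2 | h2 <;> simp_all)

def pvCountDiff (p : List Char) : Int :=
  (p.count '(' : Int) + (p.count '[' : Int) - (p.count ')' : Int) - (p.count ']' : Int)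

theorem countDiff_cons (c : Char) (p : List Char) :
    pvCountDiff (c :: p) = pvDelta c + pvCountDiff p := by
  unfold pvCountDiff pvDelta
  simp only [List.count_cons, beq_iff_eq]
  by_cases h1 : c = '(' <;> by_cases h2 : c = '[' <;> by_cases h3 : c = ')' <;>
    by_cases h4 : c = ']' <;> simp_all <;> ring

theorem prefixDepth_eq (l : List Char) (i : Nat) :
    pvPrefixDepth l i = pvCountDiff (l.take (i + 1)) := rfl

theorem prefixDepth_cons (c : Char) (cs : List Char) (i : Nat) :
    pvPrefixDepth (c :: cs) (i + 1) = pvDelta c + pvPrefixDepth cs i := by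
  rw [prefixDepth_eq, prefixDepth_eq, List.take_succ_cons, countDiff_cons]

theorem prefixDepth_zero (c : Char) (cs : List Char) :
    pvPrefixDepth (c :: cs) 0 = pvDelta c := by
  rw [prefixDepth_eq, List.take_succ_cons, List.take_zero, countDiff_cons]
  simp [pvCountDiff]

-- A's accumulator run equals the per-index prefix-count table shifted by the incoming depth d.
theorem depthGoA_eq (l : List Char) (d : Int) (ret : List Char) :
    depthGoA l d ret =
      ret ++ ((List.range l.length).map
        (fun i => (PySem.Int.toStr (d + pvPrefixDepth l i)).toList)).flatten := by
  induction l generalizing d ret with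
  | nil => simp [depthGoA]
  | cons c cs ih =>
    simp only [depthGoA]
    rw [upd_eq_delta c d, ih, List.length_cons, List.range_succ_eq_map]
    simp only [List.map_cons, List.map_map, List.flatten_cons, Function.comp_def,
      prefixDepth_zero, prefixDepth_cons, List.append_assoc]
    have h : ∀ i : Nat, d + pvDelta c + pvPrefixDepth cs i
        = d + (pvDelta c + pvPrefixDepth cs i) := fun i => by ring
    simp only [h]

-- ===== VERDICT (by name: the statement is the Claim_ definition above) =====
theorem depth_to_map_spec : Claim_equal_depth_to_map := by
  intro s _
  show depth_to_map s = depth_to_map_alt s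
  unfold depth_to_map depth_to_map_alt
  rw [depthGoA_eq]
  simp
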